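-- pv_equiv track=rewrite | github.com/chicotobi/advent_of_code_2022 | 25.py | snafu
-- ===== SOURCE A (Python) =====
-- def snafu(x):
--   y = 0
--   for i in x:
--     y *= 5
--     if i == '2':
--       y += 2
--     elif i == '1':
--       y += 1
--     elif i == '-':
--       y -= 1
--     elif i == '=':
--       y -= 2
--   return y
-- ===== SOURCE B (Python) =====
-- def snafu(x):
--   d = {'2': 2, '1': 1, '-': -1, '=': -2}
--   total = 0
--   p = 1
--   for ch in reversed(x):
--     total += d.get(ch, 0) * p
--     p *= 5
--   return total
-- ===== Notes on version B (the rewrite author's own statement) =====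
-- stated objective: alternative
-- what changed: B evaluates the base-5 polynomial right-to-left with an explicit positional weight and a digit-value dict with default 0, instead of A's left-to-right Horner rescale with an if/elif chain.
import Mathlib
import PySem

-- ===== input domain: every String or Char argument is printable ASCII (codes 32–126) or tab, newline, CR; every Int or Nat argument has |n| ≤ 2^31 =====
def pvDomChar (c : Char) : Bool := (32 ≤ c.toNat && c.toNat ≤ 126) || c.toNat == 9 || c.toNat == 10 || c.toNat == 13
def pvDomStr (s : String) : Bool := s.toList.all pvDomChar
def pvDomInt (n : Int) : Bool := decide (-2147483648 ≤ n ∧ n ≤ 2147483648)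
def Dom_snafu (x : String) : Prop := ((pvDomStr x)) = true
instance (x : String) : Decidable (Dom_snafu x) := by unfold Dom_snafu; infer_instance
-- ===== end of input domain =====

-- B evaluates the base-5 polynomial right-to-left with explicit positional weights and a
-- digit-value dict (default 0) instead of A's left-to-right Horner rescale (alternative decomposition).


-- ===== PORT A =====
-- Horner pass: y *= 5, then the if/elif chain, exactly as in A.
def snafu (x : String) : Int :=
  x.toList.foldl
    (fun y i =>
      let y := y * 5
      if i = '2' then y + 2
      else if i = '1' then y + 1
      else if i = '-' then y - 1
      else if i = '=' then y - 2
      else y)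
    0

-- ===== PORT B =====
-- the dict d of Source B
def snafuDigits : PySem.Dict Char Int :=
  PySem.Dict.ofList [('2', 2), ('1', 1), ('-', -1), ('=', -2)]

-- reversed pass with accumulator (total, p), exactly as in Source B
def snafu_alt (x : String) : Int :=
  (x.toList.reverse.foldl
    (fun (a : Int × Int) ch => (a.1 + (PySem.Dict.getD snafuDigits ch 0) * a.2, a.2 * 5))
    ((0 : Int), (1 : Int))).1

-- ===== PRECONDITION & SPEC =====
def Spec_snafu (x : String) (out : Int) : Prop := out = snafu_alt x
instance (x : String) (out : Int) : Decidable (Spec_snafu x out) := by unfold Spec_snafu; infer_instance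

-- ===== CLAIM (what is proved, stated in full; the proofs are below) =====
def Claim_equal_snafu : Prop := ∀ (x : String), Dom_snafu x → Spec_snafu x (snafu x)

-- ===== LEMMAS AND PROOFS =====

-- digit value as B reads it
def dval (c : Char) : Int := PySem.Dict.getD snafuDigits c 0

-- A's loop body equals Horner with B's digit values
theorem bodyA_eq (y : Int) (c : Char) :
    (let y := y * 5
     if c = '2' then y + 2
     else if c = '1' then y + 1
     else if c = '-' then y - 1
     else if c = '=' then y - 2
     else y) = y * 5 + dval c := by
  split_ifs with h1 h2 h3 h4
  · subst h1; have h : dval '2' = (2 : Int) := by decide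
    rw [h]
  · subst h2; have h : dval '1' = (1 : Int) := by decide
    rw [h]
  · subst h3; have h : dval '-' = (-1 : Int) := by decide
    rw [h]; ring
  · subst h4; have h : dval '=' = (-2 : Int) := by decide
    rw [h]; ring
  · have h0 : dval c = 0 := by
      have hitems : snafuDigits = PySem.Dict.mk [('2', 2), ('1', 1), ('-', -1), ('=', -2)] := by
        decide
      simp [dval, hitems, PySem.Dict.getD, PySem.Dict.get?_mk_cons,
        beq_iff_eq, Ne.symm h1, Ne.symm h2, Ne.symm h3, Ne.symm h4, PySem.Dict.get?]
    rw [h0]; ring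

-- B's fold state, fully characterised against A's Horner fold on the reversed list
theorem foldB_eq (m : List Char) (t p : Int) :
    (m.foldl (fun (a : Int × Int) ch => (a.1 + dval ch * a.2, a.2 * 5)) (t, p)).1
      = t + p * (m.reverse.foldl (fun y c => y * 5 + dval c) 0) := by
  induction m generalizing t p with
  | nil => simp
  | cons c m ih =>
    simp only [List.foldl_cons, List.reverse_cons, List.foldl_append, List.foldl_cons,
      List.foldl_nil, ih]
    ring

-- ===== VERDICT (by name: the statement is the Claim_ definition above) =====
theorem snafu_spec : Claim_equal_snafu := by
  intro x _
  unfold Spec_snafu snafu snafu_alt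
  have hA : (fun (y : Int) (i : Char) =>
      let y := y * 5
      if i = '2' then y + 2
      else if i = '1' then y + 1
      else if i = '-' then y - 1
      else if i = '=' then y - 2
      else y) = fun y c => y * 5 + dval c := by
    funext y c; exact bodyA_eq y c
  have hB : (fun (a : Int × Int) (ch : Char) =>
      (a.1 + (PySem.Dict.getD snafuDigits ch 0) * a.2, a.2 * 5))
      = fun (a : Int × Int) ch => (a.1 + dval ch * a.2, a.2 * 5) := rfl
  rw [hA, hB, foldB_eq]
  simp
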